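-- pv_equiv track=rewrite | github.com/JohnDMcMaster/open-tl866 | pytl866/examples/eprom_read.py | addr_bits
-- ===== SOURCE A (Python) =====
-- eprom_to_zif = [1,  2,  3,  4,  5,  6,  7,  8,  9,  10, 11, 12, 13, 14, \
--                 27, 28, 29, 30, 31, 32, 33, 34, 35, 36, 37, 38, 39, 40]
--
-- a_lines = [10, 9, 8, 7, 6, 5, 4, 3, 25, 24, 21, 23, 2]
--
-- def zif_to_int(ls):
--     i = 0
--     for bit in ls:
--         i = i + 2**(bit - 1)
--     return i
--
-- def eprom_to_int(pins):
--     zif = [eprom_to_zif[p - 1] for p in pins]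
--     return zif_to_int(zif)
--
-- def addr_bits(adr):
--     tmp = adr
--     i = 0
--     hi_lines = []
--     adr_len = len(a_lines)
--     while i < adr_len:
--         if tmp & 0x01:
--             hi_lines.append(a_lines[i])
--
--         tmp = tmp >> 1
--         i = i + 1
--
--     return eprom_to_int(hi_lines)
-- ===== SOURCE B (Python) =====
-- eprom_to_zif = [1,  2,  3,  4,  5,  6,  7,  8,  9,  10, 11, 12, 13, 14,
--                 27, 28, 29, 30, 31, 32, 33, 34, 35, 36, 37, 38, 39, 40]
--
-- a_lines = [10, 9, 8, 7, 6, 5, 4, 3, 25, 24, 21, 23, 2]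
--
-- # one composite table: mask for address bit i = 2**(zif_pin(a_lines[i]) - 1)
-- _masks = [1 << (eprom_to_zif[a - 1] - 1) for a in a_lines]
--
-- def addr_bits(adr):
--     out = 0
--     for i, m in enumerate(_masks):
--         if (adr >> i) & 1:
--             out += m
--     return out
-- ===== Notes on version B (the rewrite author's own statement) =====
-- stated objective: simpler
-- what changed: Replaces A's three-stage pipeline (collect set a_lines into a list, map each through eprom_to_zif, then sum the per-pin powers of two in a separate helper) with one precomputed composite mask table and a single accumulating pass over the address bits.
import Mathlib
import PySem

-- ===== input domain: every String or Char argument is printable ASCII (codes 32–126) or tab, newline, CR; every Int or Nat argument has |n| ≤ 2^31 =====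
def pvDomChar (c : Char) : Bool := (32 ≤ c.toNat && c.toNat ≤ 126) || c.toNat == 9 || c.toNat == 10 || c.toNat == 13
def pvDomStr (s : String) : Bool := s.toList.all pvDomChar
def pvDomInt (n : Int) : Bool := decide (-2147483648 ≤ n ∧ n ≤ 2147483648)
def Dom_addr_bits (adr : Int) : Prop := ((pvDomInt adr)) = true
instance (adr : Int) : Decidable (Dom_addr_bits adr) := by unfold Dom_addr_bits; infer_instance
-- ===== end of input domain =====

-- B replaces A's three-stage compose (collect high a_lines, map through eprom_to_zif, sum powers)
-- with a precomputed per-bit mask table and a single accumulating pass (objective: simpler).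

-- ===== PORT A =====
def eprom_to_zif : List Int :=
  [1, 2, 3, 4, 5, 6, 7, 8, 9, 10, 11, 12, 13, 14,
   27, 28, 29, 30, 31, 32, 33, 34, 35, 36, 37, 38, 39, 40]

def a_lines : List Int := [10, 9, 8, 7, 6, 5, 4, 3, 25, 24, 21, 23, 2]

-- 2**(bit-1): every bit here is ≥ 1, so the .toNat on the exponent is exact
def zif_to_int (ls : List Int) : Int :=
  ls.foldl (fun i bit => i + 2 ^ (bit - 1).toNat) 0

-- eprom_to_zif[p-1]: every p here satisfies 1 ≤ p ≤ 28, so getD is the exact in-range index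
def eprom_to_int (pins : List Int) : Int :=
  zif_to_int (pins.map (fun p => eprom_to_zif.getD (p - 1).toNat 0))

-- the while loop: state (tmp, i, hi_lines); fuel = adr_len - i; a_lines[i] in range, getD exact
def addr_bits_loop : Nat → Int → Nat → List Int → List Int
  | 0, _, _, hi => hi
  | f + 1, tmp, i, hi =>
      addr_bits_loop f (tmp >>> (1 : Nat)) (i + 1)
        (if PySem.Int.band tmp 1 ≠ 0 then hi ++ [a_lines.getD i 0] else hi)

def addr_bits (adr : Int) : Int :=
  eprom_to_int (addr_bits_loop a_lines.length adr 0 [])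

-- ===== PORT B =====
def masks : List Int :=
  a_lines.map (fun a => (1 : Int) <<< (eprom_to_zif.getD (a - 1).toNat 0 - 1).toNat)

def addr_bits_alt_loop : List Int → Nat → Int → Int → Int
  | [], _, _, out => out
  | m :: rest, i, adr, out =>
      addr_bits_alt_loop rest (i + 1) adr
        (if PySem.Int.band (adr >>> i) 1 ≠ 0 then out + m else out)

def addr_bits_alt (adr : Int) : Int :=
  addr_bits_alt_loop masks 0 adr 0

-- ===== PRECONDITION & SPEC =====
def Spec_addr_bits (adr : Int) (out : Int) : Prop := out = addr_bits_alt adr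
instance (adr : Int) (out : Int) : Decidable (Spec_addr_bits adr out) := by unfold Spec_addr_bits; infer_instance

-- ===== CLAIM (what is proved, stated in full; the proofs are below) =====
def Claim_equal_addr_bits : Prop := ∀ (adr : Int), Dom_addr_bits adr → Spec_addr_bits adr (addr_bits adr)

-- ===== LEMMAS AND PROOFS =====

theorem one_shiftLeft_eq_pow (k : Nat) : (1 : Int) <<< k = 2 ^ k := by
  induction k with
  | zero => rfl
  | succ n ih => rw [pow_succ, ← ih]; simp [Int.shiftLeft_succ]

theorem alt_loop_acc (l : List Int) (i : Nat) (adr out : Int) :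
    addr_bits_alt_loop l i adr out = out + addr_bits_alt_loop l i adr 0 := by
  induction l generalizing i out with
  | nil => simp [addr_bits_alt_loop]
  | cons m rest ih =>
      simp only [addr_bits_alt_loop]
      rw [ih, ih (i + 1) (if PySem.Int.band (adr >>> i) 1 ≠ 0 then 0 + m else 0)]
      split <;> ring

theorem eprom_to_int_append (hi : List Int) (a : Int) :
    eprom_to_int (hi ++ [a])
      = eprom_to_int hi + 2 ^ (eprom_to_zif.getD (a - 1).toNat 0 - 1).toNat := by
  simp [eprom_to_int, zif_to_int, List.foldl_append]

theorem loop_inv (fuel : Nat) : ∀ (i : Nat) (adr : Int) (hi : List Int),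
    fuel + i = a_lines.length →
    eprom_to_int (addr_bits_loop fuel (adr >>> i) i hi)
      = eprom_to_int hi + addr_bits_alt_loop (masks.drop i) i adr 0 := by
  induction fuel with
  | zero =>
      intro i adr hi h
      have hm : masks.length ≤ i := by simp [masks]; omega
      simp [addr_bits_loop, addr_bits_alt_loop, List.drop_of_length_le hm]
  | succ f ih =>
      intro i adr hi h
      have hi13 : i < a_lines.length := by omega
      have him : i < masks.length := by simp [masks]; omega
      have hdrop : masks.drop i = masks[i] :: masks.drop (i + 1) :=
        (List.getElem_cons_drop him).symm
      have hmask : masks[i] = (1 : Int) <<< (eprom_to_zif.getD (a_lines[i] - 1).toNat 0 - 1).toNat := by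
        simp [masks]; rfl
      have hget : a_lines.getD i 0 = a_lines[i] := List.getD_eq_getElem a_lines 0 hi13
      simp only [addr_bits_loop]
      rw [← Int.shiftRight_add adr i 1, ih (i + 1) adr _ (by omega), hdrop]
      simp only [addr_bits_alt_loop]
      rw [alt_loop_acc (masks.drop (i + 1)) (i + 1) adr]
      split
      · rw [eprom_to_int_append, hget, hmask, one_shiftLeft_eq_pow]
        conv_rhs => rw [alt_loop_acc]
        ring
      · ring

-- ===== VERDICT (by name: the statement is the Claim_ definition above) =====
theorem addr_bits_spec : Claim_equal_addr_bits := by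
  intro adr _
  show addr_bits adr = addr_bits_alt adr
  have h := loop_inv a_lines.length 0 adr [] (by simp)
  simp only [Int.shiftRight_zero, List.drop_zero] at h
  rw [addr_bits, h, addr_bits_alt]
  simp [eprom_to_int, zif_to_int]
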